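-- pv_equiv track=rewrite | github.com/fxhxdxd/upvalue-project | algorithm.py | get_stock_recommendations
-- ===== SOURCE A (Python) =====
-- from typing import List, Dict, Optional
--
-- def get_stock_recommendations(search_term: str, market_index: str) -> List[Dict]:
--     if not search_term:
--         return []
--
--     all_stocks = {
--         "NS": {  # Indian NSE
--             "SBI": "State Bank of India",
--             "RELIANCE": "Reliance Industries",
--             "TCS": "Tata Consultancy Services",
--             "HDFC": "HDFC Bank",
--             "INFOSYS": "Infosys Limited",
--             "ICICI": "ICICI Bank",
--             "ITC": "ITC Limited",
--             "KOTAK": "Kotak Mahindra Bank",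
--             "AXIS": "Axis Bank",
--             "L&T": "Larsen & Toubro",
--             "BHARTI": "Bharti Airtel"
--         },
--         "": {  # US Market
--             "APPLE": "Apple Inc.",
--             "MICROSOFT": "Microsoft Corporation",
--             "GOOGLE": "Alphabet Inc.",
--             "AMAZON": "Amazon.com Inc.",
--             "META": "Meta Platforms Inc.",
--             "TESLA": "Tesla Inc.",
--             "NVIDIA": "NVIDIA Corporation",
--             "JPMORGAN": "JPMorgan Chase & Co.",
--             "VISA": "Visa Inc.",
--             "WALMART": "Walmart Inc."
--         },
--         "KL": {  # Malaysian Market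
--             "MAYBANK": "Malayan Banking Berhad",
--             "CIMB": "CIMB Group Holdings",
--             "PBBANK": "Public Bank Berhad",
--             "TENAGA": "Tenaga Nasional",
--             "PCHEM": "Petronas Chemicals",
--             "IOICORP": "IOI Corporation",
--             "KLK": "Kuala Lumpur Kepong",
--             "SIME": "Sime Darby",
--             "GENTING": "Genting Berhad",
--             "HAPSENG": "Hap Seng Consolidated"
--         },
--         "BO": {  # Bombay Stock Exchange
--             "RELIANCE": "Reliance Industries",
--             "TCS": "Tata Consultancy Services",
--             "HDFC": "HDFC Bank",
--             "INFOSYS": "Infosys Limited",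
--             "ICICI": "ICICI Bank",
--             "ITC": "ITC Limited",
--             "KOTAK": "Kotak Mahindra Bank",
--             "AXIS": "Axis Bank",
--             "L&T": "Larsen & Toubro",
--             "BHARTI": "Bharti Airtel"
--         }
--     }
--
--     market_stocks = all_stocks.get(market_index, {})
--     search_term = search_term.upper()
--
--     suggestions = []
--     for symbol, company in market_stocks.items():
--         if (search_term in symbol.upper() or
--             search_term in company.upper()):
--             suggestions.append({
--                 'symbol': symbol,
--                 'name': company
--             })
--
--     suggestions.sort(key=lambda x: (
--         not x['symbol'].startswith(search_term),
--         not x['name'].upper().startswith(search_term),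
--         len(x['symbol'])
--     ))
--
--     return suggestions[:5]
-- ===== SOURCE B (Python) =====
-- from typing import List, Dict
--
-- _ALL_STOCKS = {
--     "NS": {
--         "SBI": "State Bank of India",
--         "RELIANCE": "Reliance Industries",
--         "TCS": "Tata Consultancy Services",
--         "HDFC": "HDFC Bank",
--         "INFOSYS": "Infosys Limited",
--         "ICICI": "ICICI Bank",
--         "ITC": "ITC Limited",
--         "KOTAK": "Kotak Mahindra Bank",
--         "AXIS": "Axis Bank",
--         "L&T": "Larsen & Toubro",
--         "BHARTI": "Bharti Airtel"
--     },
--     "": {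
--         "APPLE": "Apple Inc.",
--         "MICROSOFT": "Microsoft Corporation",
--         "GOOGLE": "Alphabet Inc.",
--         "AMAZON": "Amazon.com Inc.",
--         "META": "Meta Platforms Inc.",
--         "TESLA": "Tesla Inc.",
--         "NVIDIA": "NVIDIA Corporation",
--         "JPMORGAN": "JPMorgan Chase & Co.",
--         "VISA": "Visa Inc.",
--         "WALMART": "Walmart Inc."
--     },
--     "KL": {
--         "MAYBANK": "Malayan Banking Berhad",
--         "CIMB": "CIMB Group Holdings",
--         "PBBANK": "Public Bank Berhad",
--         "TENAGA": "Tenaga Nasional",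
--         "PCHEM": "Petronas Chemicals",
--         "IOICORP": "IOI Corporation",
--         "KLK": "Kuala Lumpur Kepong",
--         "SIME": "Sime Darby",
--         "GENTING": "Genting Berhad",
--         "HAPSENG": "Hap Seng Consolidated"
--     },
--     "BO": {
--         "RELIANCE": "Reliance Industries",
--         "TCS": "Tata Consultancy Services",
--         "HDFC": "HDFC Bank",
--         "INFOSYS": "Infosys Limited",
--         "ICICI": "ICICI Bank",
--         "ITC": "ITC Limited",
--         "KOTAK": "Kotak Mahindra Bank",
--         "AXIS": "Axis Bank",
--         "L&T": "Larsen & Toubro",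
--         "BHARTI": "Bharti Airtel"
--     }
-- }
--
--
-- def get_stock_recommendations(search_term: str, market_index: str) -> List[Dict]:
--     if not search_term:
--         return []
--     entries = _ALL_STOCKS.get(market_index, {})
--     term = search_term.upper()
--     matched = [(sym, name) for sym, name in entries.items()
--                if term in sym.upper() or term in name.upper()]
--     out = []
--     # bucket priority mirrors the intended ranking: symbol+name prefix hits first,
--     # then symbol-only, then name-only, then plain substring matches
--     for want_s, want_n in ((True, True), (True, False), (False, True), (False, False)):
--         bucket = [{'symbol': s, 'name': n} for s, n in matched
--                   if s.startswith(term) == want_s and n.upper().startswith(term) == want_n]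
--         bucket.sort(key=lambda d: len(d['symbol']))
--         out += bucket
--     return out[:5]
-- ===== Notes on version B (the rewrite author's own statement) =====
-- stated objective: alternative
-- what changed: Replaces A's single stable sort by the composite key (not symbol-prefix, not name-prefix, len) with a partition of the matches into four priority buckets (symbol+name prefix hit, symbol-only, name-only, plain substring match), each bucket stably sorted by symbol length alone and concatenated in priority order.
import Mathlib
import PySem

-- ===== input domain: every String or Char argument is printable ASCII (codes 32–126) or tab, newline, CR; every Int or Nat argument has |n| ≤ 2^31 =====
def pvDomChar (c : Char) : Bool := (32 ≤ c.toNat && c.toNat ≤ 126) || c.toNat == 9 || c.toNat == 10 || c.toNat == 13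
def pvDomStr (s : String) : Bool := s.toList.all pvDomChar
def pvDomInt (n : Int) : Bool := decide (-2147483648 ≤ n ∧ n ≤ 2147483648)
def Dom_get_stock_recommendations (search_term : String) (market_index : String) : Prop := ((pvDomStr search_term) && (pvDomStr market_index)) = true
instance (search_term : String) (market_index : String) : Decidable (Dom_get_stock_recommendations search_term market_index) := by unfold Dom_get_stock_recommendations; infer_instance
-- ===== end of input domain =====

-- B replaces A's single composite-key sort by a partition into four priority buckets each
-- stably sorted by symbol length (objective: alternative decomposition, same cost).

-- Shared data constant: the hardcoded stock table (pure data, used by both ports).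
def pvAllStocks : List (String × List (String × String)) :=
  [ ("NS",
      [ ("SBI", "State Bank of India"), ("RELIANCE", "Reliance Industries"),
        ("TCS", "Tata Consultancy Services"), ("HDFC", "HDFC Bank"),
        ("INFOSYS", "Infosys Limited"), ("ICICI", "ICICI Bank"),
        ("ITC", "ITC Limited"), ("KOTAK", "Kotak Mahindra Bank"),
        ("AXIS", "Axis Bank"), ("L&T", "Larsen & Toubro"),
        ("BHARTI", "Bharti Airtel") ]),
    ("",
      [ ("APPLE", "Apple Inc."), ("MICROSOFT", "Microsoft Corporation"),
        ("GOOGLE", "Alphabet Inc."), ("AMAZON", "Amazon.com Inc."),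
        ("META", "Meta Platforms Inc."), ("TESLA", "Tesla Inc."),
        ("NVIDIA", "NVIDIA Corporation"), ("JPMORGAN", "JPMorgan Chase & Co."),
        ("VISA", "Visa Inc."), ("WALMART", "Walmart Inc.") ]),
    ("KL",
      [ ("MAYBANK", "Malayan Banking Berhad"), ("CIMB", "CIMB Group Holdings"),
        ("PBBANK", "Public Bank Berhad"), ("TENAGA", "Tenaga Nasional"),
        ("PCHEM", "Petronas Chemicals"), ("IOICORP", "IOI Corporation"),
        ("KLK", "Kuala Lumpur Kepong"), ("SIME", "Sime Darby"),
        ("GENTING", "Genting Berhad"), ("HAPSENG", "Hap Seng Consolidated") ]),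
    ("BO",
      [ ("RELIANCE", "Reliance Industries"), ("TCS", "Tata Consultancy Services"),
        ("HDFC", "HDFC Bank"), ("INFOSYS", "Infosys Limited"),
        ("ICICI", "ICICI Bank"), ("ITC", "ITC Limited"),
        ("KOTAK", "Kotak Mahindra Bank"), ("AXIS", "Axis Bank"),
        ("L&T", "Larsen & Toubro"), ("BHARTI", "Bharti Airtel") ]) ]

-- ===== PORT A =====
-- Python's 3-tuple sort key (not sym.startswith, not name.upper().startswith, len(sym))
-- is encoded as the single Int 32*b1 + 16*b2 + len(sym): exact because every symbol in
-- the hardcoded table has length < 16 (proved in pv_len_stock below).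
def get_stock_recommendations (search_term : String) (market_index : String) : List (List (String × String)) :=
  if search_term = "" then []
  else
    let market_stocks := PySem.Dict.getD ⟨pvAllStocks⟩ market_index []
    let term := PySem.Str.upper search_term
    let suggestions := market_stocks.foldl (fun acc e =>
      if PySem.Str.isIn term (PySem.Str.upper e.1) || PySem.Str.isIn term (PySem.Str.upper e.2)
      then acc ++ [[("symbol", e.1), ("name", e.2)]] else acc) []
    let sortedSugg := PySem.List.sorted suggestions (fun x =>
      (if PySem.Str.startswith (PySem.Dict.getD ⟨x⟩ "symbol" "") term then (0 : Int) else 32)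
      + (if PySem.Str.startswith (PySem.Str.upper (PySem.Dict.getD ⟨x⟩ "name" "")) term then 0 else 16)
      + PySem.Str.len (PySem.Dict.getD ⟨x⟩ "symbol" "")) false
    PySem.List.slice sortedSugg none (some 5)

-- ===== PORT B =====
def get_stock_recommendations_alt (search_term : String) (market_index : String) : List (List (String × String)) :=
  if search_term = "" then []
  else
    let entries := PySem.Dict.getD ⟨pvAllStocks⟩ market_index []
    let term := PySem.Str.upper search_term
    let matched := entries.filter (fun e =>
      PySem.Str.isIn term (PySem.Str.upper e.1) || PySem.Str.isIn term (PySem.Str.upper e.2))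
    let out := ([(true, true), (true, false), (false, true), (false, false)] : List (Bool × Bool)).foldl
      (fun out w =>
        let bucket := (matched.filter (fun e =>
            (PySem.Str.startswith e.1 term == w.1) && (PySem.Str.startswith (PySem.Str.upper e.2) term == w.2))).map
          (fun e => [("symbol", e.1), ("name", e.2)])
        out ++ PySem.List.sorted bucket (fun d => PySem.Str.len (PySem.Dict.getD ⟨d⟩ "symbol" "")) false) []
    PySem.List.slice out none (some 5)

-- ===== PRECONDITION & SPEC =====
def Spec_get_stock_recommendations (search_term : String) (market_index : String) (out : List (List (String × String))) : Prop := out = get_stock_recommendations_alt search_term market_index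
instance (search_term : String) (market_index : String) (out : List (List (String × String))) : Decidable (Spec_get_stock_recommendations search_term market_index out) := by unfold Spec_get_stock_recommendations; infer_instance

-- ===== CLAIM (what is proved, stated in full; the proofs are below) =====
def Claim_equal_get_stock_recommendations : Prop := ∀ (search_term : String) (market_index : String), Dom_get_stock_recommendations search_term market_index → Spec_get_stock_recommendations search_term market_index (get_stock_recommendations search_term market_index)

-- ===== LEMMAS AND PROOFS =====

theorem pv_insertBy_append_left {α : Type} (before : α → α → Bool) (x : α) (A B : List α)
    (h : ∀ b ∈ B, before x b = true) :
    PySem.List.insertBy before x (A ++ B) = PySem.List.insertBy before x A ++ B := by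
  induction A with
  | nil =>
    cases B with
    | nil => rfl
    | cons b B' => simp [PySem.List.insertBy, h b (by simp)]
  | cons a A' ih =>
    simp only [List.cons_append, PySem.List.insertBy]
    by_cases hxa : before x a = true
    · simp [hxa]
    · simp [hxa, ih]

theorem pv_insertBy_append_right {α : Type} (before : α → α → Bool) (x : α) (A B : List α)
    (h : ∀ a ∈ A, before x a = false) :
    PySem.List.insertBy before x (A ++ B) = A ++ PySem.List.insertBy before x B := by
  induction A with
  | nil => rfl
  | cons a A' ih =>
    have ha : before x a = false := h a (by simp)
    simp only [List.cons_append, PySem.List.insertBy, ha]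
    simp [ih (fun a' ha' => h a' (by simp [ha']))]

theorem pv_insertBy_congr {α : Type} (b1 b2 : α → α → Bool) (x : α) (A : List α)
    (h : ∀ a ∈ A, b1 x a = b2 x a) :
    PySem.List.insertBy b1 x A = PySem.List.insertBy b2 x A := by
  induction A with
  | nil => rfl
  | cons a A' ih =>
    have ha : b1 x a = b2 x a := h a (by simp)
    simp only [PySem.List.insertBy, ha]
    by_cases h2 : b2 x a = true
    · simp [h2]
    · simp [h2, ih (fun a' ha' => h a' (by simp [ha']))]

-- A stable sort by key splits at any key-separating predicate: elements satisfying p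
-- (all strictly key-below the rest) come first, each side sorted stably.
theorem pv_sorted_split {α : Type} (key : α → Int) (p : α → Bool) (l : List α)
    (hp : ∀ a ∈ l, ∀ b ∈ l, p a = true → p b = false → key a < key b) :
    PySem.List.sorted l key false =
      PySem.List.sorted (l.filter p) key false ++ PySem.List.sorted (l.filter (fun x => !p x)) key false := by
  induction l using List.reverseRecOn with
  | nil => rfl
  | append_singleton l x ih =>
    have hme : ∀ a ∈ l, a ∈ l ++ [x] := by intro a ha; simp [ha]
    have ih' := ih (fun a ha b hb => hp a (hme a ha) b (hme b hb))
    rw [PySem.List.sorted_eq_foldl_insertBy, List.foldl_append]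
    simp only [List.foldl_cons, List.foldl_nil]
    rw [← PySem.List.sorted_eq_foldl_insertBy, ih']
    by_cases hx : p x = true
    · rw [pv_insertBy_append_left]
      · rw [List.filter_append, List.filter_append]
        simp only [List.filter_cons, List.filter_nil, hx, Bool.not_true]
        simp only [if_true, List.append_nil, if_neg (Bool.false_ne_true)]
        rw [PySem.List.sorted_eq_foldl_insertBy (l.filter p ++ [x]), List.foldl_append]
        simp only [List.foldl_cons, List.foldl_nil]
        rw [← PySem.List.sorted_eq_foldl_insertBy]
      · intro b hb
        rw [PySem.List.mem_sorted] at hb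
        have hbl := List.mem_of_mem_filter hb
        have hbp : p b = false := by
          have := List.of_mem_filter hb
          simpa using this
        simp [hp x (by simp) b (hme b hbl) hx hbp]
    · have hx' : p x = false := by simpa using hx
      rw [pv_insertBy_append_right]
      · rw [List.filter_append, List.filter_append]
        simp only [List.filter_cons, List.filter_nil, hx', Bool.not_false]
        simp only [if_true, List.append_nil, if_neg (Bool.false_ne_true)]
        rw [PySem.List.sorted_eq_foldl_insertBy (l.filter (fun x => !p x) ++ [x]), List.foldl_append]
        simp only [List.foldl_cons, List.foldl_nil]
        rw [← PySem.List.sorted_eq_foldl_insertBy]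
      · intro a ha
        rw [PySem.List.mem_sorted] at ha
        have hal := List.mem_of_mem_filter ha
        have hap : p a = true := List.of_mem_filter ha
        have := hp a (hme a hal) x (by simp) hap hx'
        simp; omega

-- Stable sort only looks at strict key comparisons between list members.
theorem pv_sorted_key_congr {α : Type} (k1 k2 : α → Int) (l : List α)
    (h : ∀ a ∈ l, ∀ b ∈ l, (k1 a < k1 b ↔ k2 a < k2 b)) :
    PySem.List.sorted l k1 false = PySem.List.sorted l k2 false := by
  induction l using List.reverseRecOn with
  | nil => rfl
  | append_singleton l x ih =>
    have hme : ∀ a ∈ l, a ∈ l ++ [x] := by intro a ha; simp [ha]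
    have ih' := ih (fun a ha b hb => h a (hme a ha) b (hme b hb))
    rw [PySem.List.sorted_eq_foldl_insertBy (l ++ [x]) k1,
      PySem.List.sorted_eq_foldl_insertBy (l ++ [x]) k2, List.foldl_append, List.foldl_append]
    simp only [List.foldl_cons, List.foldl_nil]
    rw [← PySem.List.sorted_eq_foldl_insertBy, ← PySem.List.sorted_eq_foldl_insertBy, ih']
    apply pv_insertBy_congr
    intro a ha
    rw [PySem.List.mem_sorted] at ha
    have := h x (by simp) a (hme a ha)
    simp [decide_eq_decide]
    exact this

-- Every symbol in the table has length < 16, whatever market is looked up.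
theorem pv_len_stock (m : String) :
    ∀ e ∈ PySem.Dict.getD (⟨pvAllStocks⟩ : PySem.Dict String (List (String × String))) m [],
      PySem.Str.len e.1 < 16 := by
  intro e he
  simp only [PySem.Dict.getD, PySem.Dict.get?, pvAllStocks,
    List.find?] at he
  by_cases h1 : ("NS" == m) = true
  · simp only [h1, Option.map_some, Option.getD_some] at he; revert he; revert e; decide
  · simp only [h1] at he
    by_cases h2 : ("" == m) = true
    · simp only [h2, Option.map_some, Option.getD_some] at he; revert he; revert e; decide
    · simp only [h2] at he
      by_cases h3 : ("KL" == m) = true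
      · simp only [h3, Option.map_some, Option.getD_some] at he; revert he; revert e; decide
      · simp only [h3] at he
        by_cases h4 : ("BO" == m) = true
        · simp only [h4, Option.map_some, Option.getD_some] at he; revert he; revert e; decide
        · simp only [h4, Option.map_none, Option.getD_none] at he; simp at he

-- Core equivalence, stated over an arbitrary search term and market table slice.
set_option maxHeartbeats 1000000 in
theorem pv_core (term : String) (entries : List (String × String))
    (hlen16 : ∀ e ∈ entries, PySem.Str.len e.1 < 16) :
    PySem.List.sorted
      (entries.foldl (fun acc e =>
        if PySem.Str.isIn term (PySem.Str.upper e.1) || PySem.Str.isIn term (PySem.Str.upper e.2)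
        then acc ++ [[("symbol", e.1), ("name", e.2)]] else acc) [])
      (fun x =>
        (if PySem.Str.startswith (PySem.Dict.getD ⟨x⟩ "symbol" "") term then (0 : Int) else 32)
        + (if PySem.Str.startswith (PySem.Str.upper (PySem.Dict.getD ⟨x⟩ "name" "")) term then 0 else 16)
        + PySem.Str.len (PySem.Dict.getD ⟨x⟩ "symbol" "")) false
    = ([(true, true), (true, false), (false, true), (false, false)] : List (Bool × Bool)).foldl
      (fun out w =>
        out ++ PySem.List.sorted
          (((entries.filter (fun e =>
              PySem.Str.isIn term (PySem.Str.upper e.1) || PySem.Str.isIn term (PySem.Str.upper e.2))).filter (fun e =>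
            (PySem.Str.startswith e.1 term == w.1) && (PySem.Str.startswith (PySem.Str.upper e.2) term == w.2))).map
            (fun e => [("symbol", e.1), ("name", e.2)]))
          (fun d => PySem.Str.len (PySem.Dict.getD ⟨d⟩ "symbol" "")) false) [] := by
  rw [PySem.List.foldl_append_if
    (fun e => PySem.Str.isIn term (PySem.Str.upper e.1) || PySem.Str.isIn term (PySem.Str.upper e.2))
    (fun e => [("symbol", e.1), ("name", e.2)]) entries []]
  rw [List.nil_append]
  simp only [List.foldl_cons, List.foldl_nil, List.nil_append]
  generalize hM : List.filter (fun e =>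
      PySem.Str.isIn term (PySem.Str.upper e.1) || PySem.Str.isIn term (PySem.Str.upper e.2)) entries = M
  have hMsub : ∀ e ∈ M, PySem.Str.len e.1 < 16 := by
    intro e he; exact hlen16 e (List.mem_of_mem_filter (hM ▸ he))
  clear hM
  set render : String × String → List (String × String) := fun e => [("symbol", e.1), ("name", e.2)] with hrender
  set L := M.map render with hL
  set s : List (String × String) → Bool := fun x =>
    PySem.Str.startswith (PySem.Dict.getD ⟨x⟩ "symbol" "") term with hs
  set n : List (String × String) → Bool := fun x =>
    PySem.Str.startswith (PySem.Str.upper (PySem.Dict.getD ⟨x⟩ "name" "")) term with hn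
  set lenD : List (String × String) → Int := fun x => PySem.Str.len (PySem.Dict.getD ⟨x⟩ "symbol" "") with hlenD
  set keyA : List (String × String) → Int := fun x =>
    (if s x then (0 : Int) else 32) + (if n x then 0 else 16) + lenD x with hkeyA
  have hren_s : ∀ e, s (render e) = PySem.Str.startswith e.1 term := fun e => rfl
  have hren_n : ∀ e, n (render e) = PySem.Str.startswith (PySem.Str.upper e.2) term := fun e => rfl
  have hren_len : ∀ e, lenD (render e) = PySem.Str.len e.1 := fun e => rfl
  have hbucket : ∀ (w1 w2 : Bool),
      (M.filter (fun e => (PySem.Str.startswith e.1 term == w1) && (PySem.Str.startswith (PySem.Str.upper e.2) term == w2))).map render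
      = (L.filter (fun x => s x == w1)).filter (fun x => n x == w2) := by
    intro w1 w2
    conv_rhs => rw [hL, List.filter_map, List.filter_map, List.filter_filter]
    congr 1
    apply List.filter_congr
    intro e _
    simp [Function.comp, hren_s, hren_n, Bool.and_comm]
  have hlen : ∀ x ∈ L, lenD x < 16 := by
    intro x hx
    obtain ⟨e, he, rfl⟩ := List.mem_map.mp hx
    rw [hren_len]
    exact hMsub e he
  have hlen0 : ∀ x : List (String × String), (0:Int) ≤ lenD x := by
    intro x; simp [hlenD, PySem.Str.len_eq]
  have hkey_val : ∀ x, keyA x = (if s x then (0:Int) else 32) + (if n x then 0 else 16) + lenD x :=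
    fun x => rfl
  -- top split by s
  have hsplit1 : PySem.List.sorted L keyA false =
      PySem.List.sorted (L.filter (fun x => s x == true)) keyA false
        ++ PySem.List.sorted (L.filter (fun x => s x == false)) keyA false := by
    have := pv_sorted_split keyA (fun x => s x == true) L ?_
    · rw [this]; congr 1; congr 1
      apply List.filter_congr; intro x _; cases s x <;> simp
    · intro a ha b hb hpa hpb
      have hsa : s a = true := by cases h : s a <;> simp [h] at hpa ⊢
      have hsb : s b = false := by cases h : s b <;> simp [h] at hpb ⊢
      have := hlen a ha
      have := hlen0 b
      rw [hkey_val, hkey_val, hsa, hsb]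
      by_cases hna : n a = true <;> by_cases hnb : n b = true <;> simp [hna, hnb] <;> omega
  -- second split by n, within an s-class
  have hsplit2 : ∀ w1 : Bool,
      PySem.List.sorted (L.filter (fun x => s x == w1)) keyA false =
      PySem.List.sorted ((L.filter (fun x => s x == w1)).filter (fun x => n x == true)) keyA false
        ++ PySem.List.sorted ((L.filter (fun x => s x == w1)).filter (fun x => n x == false)) keyA false := by
    intro w1
    have := pv_sorted_split keyA (fun x => n x == true) (L.filter (fun x => s x == w1)) ?_
    · rw [this]; congr 1; congr 1
      apply List.filter_congr; intro x _; cases n x <;> simp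
    · intro a ha b hb hpa hpb
      have hna : n a = true := by cases h : n a <;> simp [h] at hpa ⊢
      have hnb : n b = false := by cases h : n b <;> simp [h] at hpb ⊢
      have hsa : s a = w1 := by have := List.of_mem_filter ha; simpa using this
      have hsb : s b = w1 := by have := List.of_mem_filter hb; simpa using this
      have := hlen a (List.mem_of_mem_filter ha)
      have := hlen0 b
      rw [hkey_val, hkey_val, hna, hnb, hsa, hsb]
      cases w1 <;> simp <;> omega
  -- within a bucket the composite key orders like lenD alone
  have hcongr : ∀ (w1 w2 : Bool),
      PySem.List.sorted ((L.filter (fun x => s x == w1)).filter (fun x => n x == w2)) keyA false =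
      PySem.List.sorted ((L.filter (fun x => s x == w1)).filter (fun x => n x == w2)) lenD false := by
    intro w1 w2
    apply pv_sorted_key_congr
    intro a ha b hb
    have hna : n a = w2 := by have := List.of_mem_filter ha; simpa using this
    have hnb : n b = w2 := by have := List.of_mem_filter hb; simpa using this
    have hsa : s a = w1 := by have := List.of_mem_filter (List.mem_of_mem_filter ha); simpa using this
    have hsb : s b = w1 := by have := List.of_mem_filter (List.mem_of_mem_filter hb); simpa using this
    rw [hkey_val, hkey_val, hna, hnb, hsa, hsb]
    cases w1 <;> cases w2 <;> simp
  rw [hsplit1, hsplit2 true, hsplit2 false,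
    hcongr true true, hcongr true false, hcongr false true, hcongr false false,
    hbucket true true, hbucket true false, hbucket false true, hbucket false false]
  simp [List.append_assoc]

theorem get_stock_recommendations_spec : Claim_equal_get_stock_recommendations := by
  intro search_term market_index _
  unfold Spec_get_stock_recommendations
  unfold get_stock_recommendations get_stock_recommendations_alt
  by_cases hst : search_term = ""
  · simp [hst]
  · simp only [if_neg hst]
    exact congrArg (fun l => PySem.List.slice l none (some 5))
      (pv_core (PySem.Str.upper search_term)
        (PySem.Dict.getD (⟨pvAllStocks⟩ : PySem.Dict String (List (String × String))) market_index [])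
        (pv_len_stock market_index))
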